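-- pv_equiv track=rewrite | github.com/patrcza011/Sigma-Delta-Modulation | model/SDM.py | sigma_delta_modulator
-- ===== SOURCE A (Python) =====
-- def sigma_delta_modulator(input_signal, index=0, integrator=0, output_signal=None):
--     """
--     Recursive implementation of a first-order Sigma-Delta modulator for 0 and 1 output.
--
--     Args:
--         input_signal (array-like): The input analog signal to be converted.
--         index (int): Current index in the signal.
--         integrator (float): Current state of the integrator.
--         output_signal (list): Accumulated output signal (0 or 1).
--
--     Returns:
--         list: The quantized output signal (0 or 1).
--     """
--     if output_signal is None:
--         output_signal = []
--
--     if index >= len(input_signal):  # Base case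
--         return output_signal
--
--     # Integrator: accumulate the difference
--     quantizer = 1 if integrator > 0 else 0  # Quantizer outputs 0 or 1
--     integrator += input_signal[index] - (32768 if quantizer == 1 else -32768)
--
--     # Append the quantized value to the output
--     output_signal.append(quantizer)
--     return sigma_delta_modulator(input_signal, index + 1, integrator, output_signal)
-- ===== SOURCE B (Python) =====
-- def sigma_delta_modulator(input_signal, index=0, integrator=0, output_signal=None):
--     """Iterative first-order Sigma-Delta modulator (same behaviour, explicit loop)."""
--     if output_signal is None:
--         output_signal = []
--     while index < len(input_signal):
--         quantizer = 1 if integrator > 0 else 0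
--         integrator += input_signal[index] - (32768 if quantizer == 1 else -32768)
--         output_signal.append(quantizer)
--         index += 1
--     return output_signal
-- ===== Notes on version B (the rewrite author's own statement) =====
-- stated objective: idiomatic
-- what changed: Replaces the tail recursion (one Python call frame per sample, hitting the recursion limit on long signals) with an explicit while loop over the same integrator/index/output state.
import Mathlib
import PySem

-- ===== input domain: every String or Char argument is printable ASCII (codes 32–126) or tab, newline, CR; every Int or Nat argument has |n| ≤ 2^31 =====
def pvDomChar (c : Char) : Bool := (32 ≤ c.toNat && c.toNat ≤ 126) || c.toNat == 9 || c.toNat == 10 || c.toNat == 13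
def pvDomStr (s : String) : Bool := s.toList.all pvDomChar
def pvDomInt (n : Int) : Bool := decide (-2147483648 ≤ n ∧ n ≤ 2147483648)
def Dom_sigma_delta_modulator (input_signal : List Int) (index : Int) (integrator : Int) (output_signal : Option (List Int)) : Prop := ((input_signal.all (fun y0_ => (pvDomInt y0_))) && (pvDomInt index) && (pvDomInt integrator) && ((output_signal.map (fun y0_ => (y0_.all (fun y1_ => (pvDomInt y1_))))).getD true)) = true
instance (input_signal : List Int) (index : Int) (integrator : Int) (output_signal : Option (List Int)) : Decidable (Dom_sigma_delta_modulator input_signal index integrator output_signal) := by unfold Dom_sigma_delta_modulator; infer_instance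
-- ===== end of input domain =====

-- B replaces A's tail recursion by an explicit while loop over the same state (no call stack); return value only — both Pythons also mutate a caller-supplied output_signal list identically.

-- ===== PORT A =====
-- A's recursion: fuel = number of remaining iterations (len - index); each step reads
-- input_signal[index] (Python indexing, negative wraps: pyGet?), appends the quantizer bit,
-- and recurses with index+1.
def pvArec (input : List Int) : Nat → Int → Int → List Int → List Int
  | 0, _, _, out => out
  | n + 1, index, integrator, out =>
    let quantizer : Int := if integrator > 0 then 1 else 0
    let x := (PySem.List.pyGet? input index).getD 0
    pvArec input n (index + 1) (integrator + x - (if quantizer = 1 then 32768 else -32768))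
      (out ++ [quantizer])

def sigma_delta_modulator (input_signal : List Int) (index : Int) (integrator : Int) (output_signal : Option (List Int)) : List Int :=
  let out := output_signal.getD []
  pvArec input_signal ((input_signal.length : Int) - index).toNat index integrator out

-- ===== PORT B =====
-- B's while loop: fold over the remaining indices range(index, len) carrying (integrator, output).
def sigma_delta_modulator_alt (input_signal : List Int) (index : Int) (integrator : Int) (output_signal : Option (List Int)) : List Int :=
  let out := output_signal.getD []
  ((PySem.List.pyRange index (input_signal.length : Int) 1).foldl
    (fun (s : Int × List Int) i =>
      let quantizer : Int := if s.1 > 0 then 1 else 0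
      (s.1 + (PySem.List.pyGet? input_signal i).getD 0 - (if quantizer = 1 then 32768 else -32768),
       s.2 ++ [quantizer]))
    (integrator, out)).2

-- ===== PRECONDITION & SPEC =====
-- Pre_ excludes index < -len(input_signal): there Python A's first input_signal[index] raises IndexError.
def Pre_sigma_delta_modulator (input_signal : List Int) (index : Int) (integrator : Int) (output_signal : Option (List Int)) : Prop :=
  -(input_signal.length : Int) ≤ index
instance (input_signal : List Int) (index : Int) (integrator : Int) (output_signal : Option (List Int)) : Decidable (Pre_sigma_delta_modulator input_signal index integrator output_signal) := by unfold Pre_sigma_delta_modulator; infer_instance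
def pvWitness_sigma_delta_modulator : List Int × Int × Int × Option (List Int) := ([40000, -1000, 7], 0, 0, none)

def Spec_sigma_delta_modulator (input_signal : List Int) (index : Int) (integrator : Int) (output_signal : Option (List Int)) (out : List Int) : Prop := out = sigma_delta_modulator_alt input_signal index integrator output_signal
instance (input_signal : List Int) (index : Int) (integrator : Int) (output_signal : Option (List Int)) (out : List Int) : Decidable (Spec_sigma_delta_modulator input_signal index integrator output_signal out) := by unfold Spec_sigma_delta_modulator; infer_instance

-- ===== CLAIM (what is proved, stated in full; the proofs are below) =====
def Claim_equal_sigma_delta_modulator : Prop := ∀ (input_signal : List Int) (index : Int) (integrator : Int) (output_signal : Option (List Int)), Dom_sigma_delta_modulator input_signal index integrator output_signal → Pre_sigma_delta_modulator input_signal index integrator output_signal → Spec_sigma_delta_modulator input_signal index integrator output_signal (sigma_delta_modulator input_signal index integrator output_signal)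

-- ===== LEMMAS AND PROOFS =====
theorem pvArec_eq_foldl (input : List Int) (n : Nat) (index integrator : Int) (out : List Int)
    (h : ((input.length : Int) - index).toNat = n) :
    pvArec input n index integrator out =
      ((PySem.List.pyRange index (input.length : Int) 1).foldl
        (fun (s : Int × List Int) i =>
          let quantizer : Int := if s.1 > 0 then 1 else 0
          (s.1 + (PySem.List.pyGet? input i).getD 0 - (if quantizer = 1 then 32768 else -32768),
           s.2 ++ [quantizer]))
        (integrator, out)).2 := by
  induction n generalizing index integrator out with
  | zero =>
    have hle : (input.length : Int) ≤ index := by omega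
    rw [PySem.List.pyRange_one_eq_nil hle]
    rfl
  | succ n ih =>
    have hlt : index < (input.length : Int) := by omega
    rw [PySem.List.pyRange_one_cons hlt]
    simp only [List.foldl_cons]
    exact ih (index + 1) _ _ (by omega)

-- ===== VERDICT (by name: the statement is the Claim_ definition above) =====
theorem sigma_delta_modulator_spec : Claim_equal_sigma_delta_modulator := by
  intro input index integrator output _ _
  unfold Spec_sigma_delta_modulator sigma_delta_modulator sigma_delta_modulator_alt
  exact pvArec_eq_foldl input _ index integrator _ rfl
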